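-- pv_equiv track=rewrite | github.com/ohdnf/algorithms | swea/d5/1242/1242_code-scanning.py | check
-- ===== SOURCE A (Python) =====
-- def check(code):
--     # 암호코드 검증
--     chk = res = code[-1]
--     for i in range(7):
--         if i % 2:
--             chk += code[i]
--         else:
--             chk += code[i] * 3
--         res += code[i]
--     if chk % 10:
--         return 0
--     else:
--         return res
-- ===== SOURCE B (Python) =====
-- def check(code):
--     # Recursive pair-wise decomposition: consume (even,odd) pairs from the
--     # front, returning (weighted checksum, plain sum) for the first 7 entries.
--     def pairs(xs, n):
--         if n == 0:
--             return (3 * xs[0], xs[0])   # lone 7th entry (even position)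
--         c, r = pairs(xs[2:], n - 1)
--         return (c + 3 * xs[0] + xs[1], r + xs[0] + xs[1])
--     last = code[-1]
--     c, r = pairs(code, 3)
--     return 0 if (last + c) % 10 else last + r
-- ===== Notes on version B (the rewrite author's own statement) =====
-- stated objective: alternative
-- what changed: Replaces A's indexed parity-branching loop over range(7) with a structural recursion that consumes (even,odd) pairs from the front of the list, combining each pair's weighted and plain contributions on the way back up.
import Mathlib
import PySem

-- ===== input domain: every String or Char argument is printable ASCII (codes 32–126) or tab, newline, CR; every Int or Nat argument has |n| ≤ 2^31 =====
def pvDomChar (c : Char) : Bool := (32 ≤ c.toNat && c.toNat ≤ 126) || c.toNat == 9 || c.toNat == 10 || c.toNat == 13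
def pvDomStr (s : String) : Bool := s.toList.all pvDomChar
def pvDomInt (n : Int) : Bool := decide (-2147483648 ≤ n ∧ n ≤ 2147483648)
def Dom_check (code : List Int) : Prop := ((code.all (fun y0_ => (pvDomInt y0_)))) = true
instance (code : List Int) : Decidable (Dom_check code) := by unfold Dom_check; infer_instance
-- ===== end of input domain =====

-- B replaces A's indexed parity-branching loop with a recursion that consumes
-- (even,odd) pairs from the front of the list; return value only.

-- ===== PORT A =====
-- literal port: chk = res = code[-1]; for i in range(7): parity branch; then chk % 10 test
def check (code : List Int) : Int :=
  let last := (PySem.List.pyGet? code (-1)).getD 0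
  let p := (List.range 7).foldl
    (fun (s : Int × Int) i =>
      let c := (PySem.List.pyGet? code (Int.ofNat i)).getD 0
      (if i % 2 = 1 then s.1 + c else s.1 + c * 3, s.2 + c))
    (last, last)
  if PySem.Int.mod p.1 10 ≠ 0 then 0 else p.2

-- ===== PORT B =====
-- helper 'pairs': recursion consuming (even,odd) pairs via xs[2:] slices
def pvPairs (xs : List Int) (n : Nat) : Int × Int :=
  match n with
  | 0 => (3 * (PySem.List.pyGet? xs 0).getD 0, (PySem.List.pyGet? xs 0).getD 0)
  | Nat.succ m =>
    let p := pvPairs (PySem.List.slice xs (some 2) none) m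
    (p.1 + 3 * (PySem.List.pyGet? xs 0).getD 0 + (PySem.List.pyGet? xs 1).getD 0,
     p.2 + (PySem.List.pyGet? xs 0).getD 0 + (PySem.List.pyGet? xs 1).getD 0)

def check_alt (code : List Int) : Int :=
  let last := (PySem.List.pyGet? code (-1)).getD 0
  let p := pvPairs code 3
  if PySem.Int.mod (last + p.1) 10 ≠ 0 then 0 else last + p.2

-- ===== PRECONDITION & SPEC =====
-- A indexes code[0..6] and code[-1], raising IndexError for lists shorter than 7.
def Pre_check (code : List Int) : Prop := 7 ≤ code.length
instance (code : List Int) : Decidable (Pre_check code) := by unfold Pre_check; infer_instance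
def pvWitness_check : List Int := [1, 2, 3, 4, 5, 6, 7, 8]

def Spec_check (code : List Int) (out : Int) : Prop := out = check_alt code
instance (code : List Int) (out : Int) : Decidable (Spec_check code out) := by unfold Spec_check; infer_instance

-- ===== CLAIM (what is proved, stated in full; the proofs are below) =====
def Claim_equal_check : Prop := ∀ (code : List Int), Dom_check code → Pre_check code → Spec_check code (check code)

-- ===== LEMMAS AND PROOFS =====

-- ===== VERDICT (by name: the statement is the Claim_ definition above) =====
set_option maxHeartbeats 1000000 in
theorem check_spec : Claim_equal_check := by
  intro code _ hpre
  unfold Pre_check at hpre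
  obtain ⟨a, b, c, d, e, f, g, rest, rfl⟩ :
      ∃ a b c d e f g rest, code = a :: b :: c :: d :: e :: f :: g :: rest := by
    match code, hpre with
    | a :: b :: c :: d :: e :: f :: g :: rest, _ => exact ⟨a, b, c, d, e, f, g, rest, rfl⟩
  have cast0 : ((0:Int)) = ((0:Nat):Int) := by norm_num
  have cast1 : ((1:Int)) = ((1:Nat):Int) := by norm_num
  have cast2 : ((2:Int)) = ((2:Nat):Int) := by norm_num
  have cast3 : ((3:Int)) = ((3:Nat):Int) := by norm_num
  have cast4 : ((4:Int)) = ((4:Nat):Int) := by norm_num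
  have cast5 : ((5:Int)) = ((5:Nat):Int) := by norm_num
  have cast6 : ((6:Int)) = ((6:Nat):Int) := by norm_num
  have e0 : PySem.List.pyGet? (a::b::c::d::e::f::g::rest) 0 = some a := by
    rw [cast0, PySem.List.pyGet?_ofNat _ _ (by simp)]; simp
  have e1 : PySem.List.pyGet? (a::b::c::d::e::f::g::rest) 1 = some b := by
    rw [cast1, PySem.List.pyGet?_ofNat _ _ (by simp)]; simp
  have e2 : PySem.List.pyGet? (a::b::c::d::e::f::g::rest) 2 = some c := by
    rw [cast2, PySem.List.pyGet?_ofNat _ _ (by simp)]; simp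
  have e3 : PySem.List.pyGet? (a::b::c::d::e::f::g::rest) 3 = some d := by
    rw [cast3, PySem.List.pyGet?_ofNat _ _ (by simp)]; simp
  have e4 : PySem.List.pyGet? (a::b::c::d::e::f::g::rest) 4 = some e := by
    rw [cast4, PySem.List.pyGet?_ofNat _ _ (by simp)]; simp
  have e5 : PySem.List.pyGet? (a::b::c::d::e::f::g::rest) 5 = some f := by
    rw [cast5, PySem.List.pyGet?_ofNat _ _ (by simp)]; simp
  have e6 : PySem.List.pyGet? (a::b::c::d::e::f::g::rest) 6 = some g := by
    rw [cast6, PySem.List.pyGet?_ofNat _ _ (by simp)]; simp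
  have f0 : PySem.List.pyGet? (c::d::e::f::g::rest) 0 = some c := by
    rw [cast0, PySem.List.pyGet?_ofNat _ _ (by simp)]; simp
  have f1 : PySem.List.pyGet? (c::d::e::f::g::rest) 1 = some d := by
    rw [cast1, PySem.List.pyGet?_ofNat _ _ (by simp)]; simp
  have h0 : PySem.List.pyGet? (e::f::g::rest) 0 = some e := by
    rw [cast0, PySem.List.pyGet?_ofNat _ _ (by simp)]; simp
  have h1 : PySem.List.pyGet? (e::f::g::rest) 1 = some f := by
    rw [cast1, PySem.List.pyGet?_ofNat _ _ (by simp)]; simp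
  have k0 : PySem.List.pyGet? (g::rest) 0 = some g := by
    rw [cast0, PySem.List.pyGet?_ofNat _ _ (by simp)]; simp
  have sl : ∀ xs : List Int, PySem.List.slice xs (some 2) none = xs.drop 2 := by
    intro xs; rw [cast2]; exact PySem.List.slice_from_natCast xs 2
  unfold Spec_check check check_alt
  simp only [List.range_succ, List.foldl_append, List.foldl_cons, List.foldl_nil,
    pvPairs, sl, List.drop_succ_cons, List.drop_zero]
  norm_num [e0, e1, e2, e3, e4, e5, e6, f0, f1, h0, h1, k0]
  ring_nf
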